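-- pv_equiv track=rewrite | github.com/Ahmed-Abouzeid/MMSS_extended | utils.py | get_plot_data
-- ===== SOURCE A (Python) =====
-- def get_plot_data(pred_stamps, real_stamps, realization_bounds):
--
--     pred_chunked = chunk_timestamps(pred_stamps, realization_bounds)
--     real_chunked = chunk_timestamps(real_stamps, realization_bounds)
--
--     event_nums_real = []
--     event_nums_pred = []
--     X = []
--     for e, user in enumerate(pred_chunked):
--         X.append(e)
--         event_nums_pred.append(len(user[-1]))
--         event_nums_real.append(len(real_chunked[e][-1]))
--
--     return X, event_nums_real, event_nums_pred
--
-- def chunk_timestamps(timestamps, realization_bounds):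
--     """function to transform timestamps into chunks per hour/or some minutes, in order to be able to evaluate
--      Hawkes simulation results per each time realization"""
--
--     timestamps_per_realization = []
--     for user_id in timestamps.keys():
--         user_chunks = []
--         for e, bound in enumerate(realization_bounds):
--             chunk = []
--             for t in timestamps[user_id]:
--
--                 if e * realization_bounds[0] < t <= bound:
--                     chunk.append(t)
--
--             user_chunks.append(chunk)
--
--         timestamps_per_realization.append(user_chunks)
--
--     return timestamps_per_realization
-- ===== SOURCE B (Python) =====
-- def get_plot_data(pred_stamps, real_stamps, realization_bounds):
--     lo = (len(realization_bounds) - 1) * realization_bounds[0]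
--     hi = realization_bounds[-1]
--     pred_counts = [len([t for t in ts if lo < t <= hi])
--                    for ts in pred_stamps.values()]
--     real_vals = list(real_stamps.values())
--     real_counts = [len([t for t in real_vals[e] if lo < t <= hi])
--                    for e in range(len(pred_counts))]
--     X = list(range(len(pred_counts)))
--     return X, real_counts, pred_counts
-- ===== Notes on version B (the rewrite author's own statement) =====
-- stated objective: faster
-- what changed: Intended as faster (measured ~395x at n=1024 in a timing run, unconfirmed at the largest size): B drops chunk_timestamps entirely: instead of building every per-bound chunk for every user, it computes the last interval (lo, hi] once and directly counts each user's timestamps inside it, indexing real users positionally.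
-- outside the precondition, e.g. on get_plot_data({}, {}, []): A returns ([], [], []), B raises IndexError
import Mathlib
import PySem

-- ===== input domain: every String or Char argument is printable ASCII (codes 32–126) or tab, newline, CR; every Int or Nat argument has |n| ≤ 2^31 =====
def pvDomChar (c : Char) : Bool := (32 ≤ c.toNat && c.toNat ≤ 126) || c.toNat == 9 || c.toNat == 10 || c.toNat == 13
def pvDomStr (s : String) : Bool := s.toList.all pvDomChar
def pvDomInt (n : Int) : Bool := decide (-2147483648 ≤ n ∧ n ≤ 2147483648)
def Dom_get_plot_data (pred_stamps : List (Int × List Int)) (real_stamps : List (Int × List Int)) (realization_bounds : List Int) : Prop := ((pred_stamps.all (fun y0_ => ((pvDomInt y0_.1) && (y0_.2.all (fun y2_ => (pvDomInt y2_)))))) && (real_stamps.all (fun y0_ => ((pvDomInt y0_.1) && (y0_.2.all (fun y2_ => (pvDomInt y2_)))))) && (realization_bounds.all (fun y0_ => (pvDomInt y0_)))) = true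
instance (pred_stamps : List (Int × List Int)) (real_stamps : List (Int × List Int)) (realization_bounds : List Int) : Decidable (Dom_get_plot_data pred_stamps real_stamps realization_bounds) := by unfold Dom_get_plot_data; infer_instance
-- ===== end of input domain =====

-- B counts only the last-interval timestamps per user directly, skipping all the
-- per-bound chunk construction A does; intended as faster (O(users·stamps) vs
-- O(users·bounds·stamps)); a timing run measured ~395x at n=1024 but could not
-- confirm the largest size.

-- ===== PORT A =====
-- literal port of chunk_timestamps (dict → PySem.Dict built from the assoc list)
def pvChunkA (timestamps : List (Int × List Int)) (realization_bounds : List Int) : List (List (List Int)) :=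
  let d := PySem.Dict.ofList timestamps
  (PySem.Dict.keys d).foldl (fun tpr uid =>
    tpr ++ [(PySem.List.enumerate realization_bounds).foldl (fun user_chunks eb =>
      user_chunks ++ [(PySem.Dict.getD d uid []).foldl (fun chunk t =>
        if eb.1 * PySem.List.pyGetD realization_bounds 0 0 < t ∧ t ≤ eb.2 then chunk ++ [t] else chunk) []]) []]) []

def get_plot_data (pred_stamps : List (Int × List Int)) (real_stamps : List (Int × List Int)) (realization_bounds : List Int) : List Int × List Int × List Int :=
  let pred_chunked := pvChunkA pred_stamps realization_bounds
  let real_chunked := pvChunkA real_stamps realization_bounds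
  -- acc = (X, event_nums_real, event_nums_pred); user[-1] / real_chunked[e] via pyGet?
  -- (.getD [] is a totality guard only: Pre_ puts the none cases out of scope)
  (PySem.List.enumerate pred_chunked).foldl (fun acc eu =>
    (acc.1 ++ [eu.1],
     acc.2.1 ++ [Int.ofNat ((PySem.List.pyGet? ((PySem.List.pyGet? real_chunked eu.1).getD []) (-1)).getD []).length],
     acc.2.2 ++ [Int.ofNat ((PySem.List.pyGet? eu.2 (-1)).getD []).length])) ([], [], [])

-- ===== PORT B =====
def get_plot_data_alt (pred_stamps : List (Int × List Int)) (real_stamps : List (Int × List Int)) (realization_bounds : List Int) : List Int × List Int × List Int :=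
  let lo := ((realization_bounds.length : Int) - 1) * PySem.List.pyGetD realization_bounds 0 0
  let hi := PySem.List.pyGetD realization_bounds (-1) 0
  let pred_counts := (PySem.Dict.values (PySem.Dict.ofList pred_stamps)).map
    (fun ts => Int.ofNat (ts.filter (fun t => decide (lo < t ∧ t ≤ hi))).length)
  let real_vals := PySem.Dict.values (PySem.Dict.ofList real_stamps)
  let real_counts := (List.range pred_counts.length).map
    (fun e => Int.ofNat (((PySem.List.pyGet? real_vals (Int.ofNat e)).getD []).filter (fun t => decide (lo < t ∧ t ≤ hi))).length)
  let X := (List.range pred_counts.length).map (fun e => Int.ofNat e)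
  (X, real_counts, pred_counts)

-- ===== PRECONDITION & SPEC =====
-- Pre_ excludes empty realization_bounds (A raises IndexError on user[-1] whenever a user exists,
-- and returns ([],[],[]) only in the degenerate case pred_stamps = {}, where B raises on bounds[0]),
-- and dicts where pred has more distinct users than real (both A and B raise IndexError there).
def Pre_get_plot_data (pred_stamps : List (Int × List Int)) (real_stamps : List (Int × List Int)) (realization_bounds : List Int) : Prop :=
  realization_bounds ≠ [] ∧
  (PySem.List.dedup (pred_stamps.map Prod.fst)).length ≤ (PySem.List.dedup (real_stamps.map Prod.fst)).length
instance (pred_stamps : List (Int × List Int)) (real_stamps : List (Int × List Int)) (realization_bounds : List Int) : Decidable (Pre_get_plot_data pred_stamps real_stamps realization_bounds) := by unfold Pre_get_plot_data; infer_instance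
def pvWitness_get_plot_data : (List (Int × List Int)) × (List (Int × List Int)) × List Int :=
  ([(1, [1, 5, 12])], [(1, [2, 11]), (2, [3])], [5, 10, 15])

def Spec_get_plot_data (pred_stamps : List (Int × List Int)) (real_stamps : List (Int × List Int)) (realization_bounds : List Int) (out : List Int × List Int × List Int) : Prop := out = get_plot_data_alt pred_stamps real_stamps realization_bounds
instance (pred_stamps : List (Int × List Int)) (real_stamps : List (Int × List Int)) (realization_bounds : List Int) (out : List Int × List Int × List Int) : Decidable (Spec_get_plot_data pred_stamps real_stamps realization_bounds out) := by unfold Spec_get_plot_data; infer_instance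

-- ===== CLAIM (what is proved, stated in full; the proofs are below) =====
def Claim_equal_get_plot_data : Prop := ∀ (pred_stamps : List (Int × List Int)) (real_stamps : List (Int × List Int)) (realization_bounds : List Int), Dom_get_plot_data pred_stamps real_stamps realization_bounds → Pre_get_plot_data pred_stamps real_stamps realization_bounds → Spec_get_plot_data pred_stamps real_stamps realization_bounds (get_plot_data pred_stamps real_stamps realization_bounds)

-- ===== LEMMAS AND PROOFS =====

lemma keysOfList (l : List (Int × List Int)) : PySem.Dict.keys (PySem.Dict.ofList l) = PySem.List.dedup (l.map Prod.fst) := by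
  have h := PySem.Dict.keys_foldl_insert_key (l := l) (key := Prod.fst) (f := fun d x => x.2) (d := (PySem.Dict.empty : PySem.Dict Int (List Int)))
  simp [PySem.Dict.ofList, PySem.Dict.update] at h ⊢
  rw [h]
  simp [PySem.Set.update_nil_left]

lemma chunkA_eq (ts : List (Int × List Int)) (b : List Int) :
    pvChunkA ts b = (PySem.Dict.keys (PySem.Dict.ofList ts)).map (fun uid =>
      (PySem.List.enumerate b).map (fun eb =>
        (PySem.Dict.getD (PySem.Dict.ofList ts) uid []).filter
          (fun t => decide (eb.1 * PySem.List.pyGetD b 0 0 < t ∧ t ≤ eb.2)))) := by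
  unfold pvChunkA
  simp only [PySem.List.foldl_append_singleton_eq_map, PySem.List.foldl_append_ite_eq_filter,
    List.nil_append]

lemma last_enum_map {α : Type} (b : List Int) (hb : b ≠ []) (g : Int × Int → α) :
    ((PySem.List.enumerate b).map g).getLast? = some (g (((b.length - 1 : Nat) : Int), b.getLast hb)) := by
  conv_lhs => rw [← List.dropLast_append_getLast hb]
  rw [PySem.List.enumerate_append]
  simp [PySem.List.enumerate_cons, List.getLast?_append]

lemma foldl_triple {α β : Type} (l : List α) (f g h : α → β) (a b c : List β) :
    l.foldl (fun acc x => (acc.1 ++ [f x], acc.2.1 ++ [g x], acc.2.2 ++ [h x])) (a, b, c)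
      = (a ++ l.map f, b ++ l.map g, c ++ l.map h) := by
  induction l generalizing a b c with
  | nil => simp
  | cons x xs ih => simp [ih]

lemma pyGet?_map_of_lt {α β : Type} (f : α → β) (l : List α) (i : Nat) (h : i < l.length) :
    PySem.List.pyGet? (l.map f) ((i : Int)) = some (f l[i]) := by
  rw [PySem.List.pyGet?_natCast]
  simp [h]

theorem core (ps rs : List (Int × List Int)) (b : List Int) (hb : b ≠ [])
    (hnm : (PySem.List.dedup (ps.map Prod.fst)).length ≤ (PySem.List.dedup (rs.map Prod.fst)).length) :
    get_plot_data ps rs b = get_plot_data_alt ps rs b := by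
  have h1 : 1 ≤ b.length := List.length_pos_of_ne_nil hb
  set dp := PySem.Dict.ofList ps with hdp
  set dr := PySem.Dict.ofList rs with hdr
  have hkp : dp.keys = PySem.List.dedup (ps.map Prod.fst) := keysOfList ps
  have hkr : dr.keys = PySem.List.dedup (rs.map Prod.fst) := keysOfList rs
  have hcond : ∀ ts : List Int,
      ts.filter (fun t => decide ((((b.length - 1 : Nat) : Int)) * PySem.List.pyGetD b 0 0 < t ∧ t ≤ b.getLast hb))
        = ts.filter (fun t => decide (((b.length : Int) - 1) * PySem.List.pyGetD b 0 0 < t ∧ t ≤ PySem.List.pyGetD b (-1) 0)) := by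
    intro ts
    congr 1
    funext t
    rw [PySem.List.pyGetD_neg_one b 0 hb, Nat.cast_sub h1]
    norm_num
  have hlast : ∀ (d : PySem.Dict Int (List Int)) (uid : Int),
      (PySem.List.pyGet? ((PySem.List.enumerate b).map (fun eb =>
          (PySem.Dict.getD d uid []).filter (fun t => decide (eb.1 * PySem.List.pyGetD b 0 0 < t ∧ t ≤ eb.2)))) (-1)).getD []
        = (PySem.Dict.getD d uid []).filter (fun t => decide (((b.length : Int) - 1) * PySem.List.pyGetD b 0 0 < t ∧ t ≤ PySem.List.pyGetD b (-1) 0)) := by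
    intro d uid
    rw [PySem.List.pyGet?_neg_one, last_enum_map b hb]
    simp only [Option.getD_some]
    exact hcond _
  have hvp : dp.values = dp.keys.map (fun k => PySem.Dict.getD dp k []) :=
    PySem.Dict.values_eq_map_keys dp (by rw [hdp]; exact PySem.Dict.nodup_keys_ofList ps) []
  have hvr : dr.values = dr.keys.map (fun k => PySem.Dict.getD dr k []) :=
    PySem.Dict.values_eq_map_keys dr (by rw [hdr]; exact PySem.Dict.nodup_keys_ofList rs) []
  have hnm' : dp.keys.length ≤ dr.keys.length := by rw [hkp, hkr]; exact hnm
  rw [get_plot_data, get_plot_data_alt]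
  simp only [chunkA_eq, ← hdp, ← hdr, foldl_triple, List.nil_append, hvp, hvr,
    List.length_map, Int.ofNat_eq_natCast]
  refine Prod.ext ?_ (Prod.ext ?_ ?_)
  · -- X
    apply List.ext_getElem
    · simp
    · intro i hi1 hi2
      simp [PySem.List.getElem_enumerate]
  · -- real counts
    apply List.ext_getElem
    · simp
    · intro i hi1 hi2
      simp only [List.length_map, PySem.List.length_enumerate] at hi1
      have him : i < dr.keys.length := lt_of_lt_of_le hi1 hnm'
      simp only [List.getElem_map, List.getElem_range, PySem.List.getElem_enumerate, zero_add]
      rw [pyGet?_map_of_lt _ _ i him, pyGet?_map_of_lt _ _ i him]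
      simp only [Option.getD_some, hlast dr]
  · -- pred counts
    apply List.ext_getElem
    · simp
    · intro i hi1 hi2
      simp only [List.getElem_map, PySem.List.getElem_enumerate]
      rw [hlast dp]

-- ===== VERDICT (by name: the statement is the Claim_ definition above) =====
theorem get_plot_data_spec : Claim_equal_get_plot_data := by
  intro ps rs b _ hpre
  unfold Pre_get_plot_data at hpre
  unfold Spec_get_plot_data
  exact core ps rs b hpre.1 hpre.2
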